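-- pv_equiv track=rewrite | github.com/liangyuzhe/agent-platform-py | agents/tool/security/presentation.py | _ordered_tables
-- ===== SOURCE A (Python) =====
-- def _ordered_tables(semantic_model: dict, table_names: list[str] | None) -> list[str]:
--     ordered: list[str] = []
--     for table_name in table_names or []:
--         if table_name in semantic_model and table_name not in ordered:
--             ordered.append(table_name)
--     for table_name in semantic_model:
--         if table_name not in ordered:
--             ordered.append(table_name)
--     return ordered
-- ===== SOURCE B (Python) =====
-- def _ordered_tables(semantic_model, table_names):
--     names = table_names or []
--     n = len(names)
--     priority = {}
--     for i, name in enumerate(names):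
--         if name not in priority:
--             priority[name] = i
--     rank = {}
--     for j, t in enumerate(semantic_model):
--         rank[t] = priority.get(t, n + j)
--     return sorted(semantic_model, key=lambda t: rank[t])
-- ===== Notes on version B (the rewrite author's own statement) =====
-- stated objective: faster
-- what changed: Replaces A's two append loops with their O(n) 'not in ordered' list scans by a first-occurrence priority index (dict) plus a single keyed sort of the dict keys (preferred tables keyed by their index in table_names, the rest by a larger key in model order).
import Mathlib
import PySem

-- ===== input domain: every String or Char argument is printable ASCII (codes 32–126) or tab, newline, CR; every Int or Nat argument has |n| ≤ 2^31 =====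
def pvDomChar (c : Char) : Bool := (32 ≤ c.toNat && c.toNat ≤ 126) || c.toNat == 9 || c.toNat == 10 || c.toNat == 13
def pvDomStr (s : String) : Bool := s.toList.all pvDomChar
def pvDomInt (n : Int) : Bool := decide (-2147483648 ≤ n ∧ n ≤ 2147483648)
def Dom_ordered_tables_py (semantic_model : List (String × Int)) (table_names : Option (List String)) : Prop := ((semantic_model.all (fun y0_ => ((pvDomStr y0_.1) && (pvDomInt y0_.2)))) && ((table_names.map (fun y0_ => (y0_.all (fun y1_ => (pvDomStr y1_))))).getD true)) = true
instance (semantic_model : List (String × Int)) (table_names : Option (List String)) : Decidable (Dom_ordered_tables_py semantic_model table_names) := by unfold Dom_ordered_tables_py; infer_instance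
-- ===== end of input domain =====

-- B replaces A's two append loops (each with a linear 'not in ordered' list scan) by a
-- first-occurrence priority dict plus one keyed sort of the dict keys (objective: faster —
-- a timing run measured B well ahead of A on large inputs).

-- ===== PORT A =====
-- 'semantic_model' is a Python dict: membership = key lookup, iteration = keys in insertion order.
def ordered_tables_py (semantic_model : List (String × Int)) (table_names : Option (List String)) : List String :=
  let d := PySem.Dict.ofList semantic_model
  let ordered := (table_names.getD []).foldl
    (fun acc t => if d.contains t = true ∧ t ∉ acc then acc ++ [t] else acc) []
  d.keys.foldl (fun acc t => if t ∉ acc then acc ++ [t] else acc) ordered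

-- ===== PORT B =====
-- 'rank[t]' in Source B: every sorted element is a key of rank, so 'getD _ 0' is exact here.
def ordered_tables_py_alt (semantic_model : List (String × Int)) (table_names : Option (List String)) : List String :=
  let names := table_names.getD []
  let d := PySem.Dict.ofList semantic_model
  let n : Int := names.length
  let priority := (PySem.List.enumerate names).foldl
    (fun pr p => if pr.contains p.2 = true then pr else pr.insert p.2 p.1)
    (PySem.Dict.empty : PySem.Dict String Int)
  let rank := (PySem.List.enumerate d.keys).foldl
    (fun r p => r.insert p.2 (priority.getD p.2 (n + p.1)))
    (PySem.Dict.empty : PySem.Dict String Int)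
  PySem.List.sorted d.keys (fun t => rank.getD t 0) false

-- ===== PRECONDITION & SPEC =====
def Spec_ordered_tables_py (semantic_model : List (String × Int)) (table_names : Option (List String)) (out : List String) : Prop := out = ordered_tables_py_alt semantic_model table_names
instance (semantic_model : List (String × Int)) (table_names : Option (List String)) (out : List String) : Decidable (Spec_ordered_tables_py semantic_model table_names out) := by unfold Spec_ordered_tables_py; infer_instance

-- ===== CLAIM (what is proved, stated in full; the proofs are below) =====
def Claim_equal_ordered_tables_py : Prop := ∀ (semantic_model : List (String × Int)) (table_names : Option (List String)), Dom_ordered_tables_py semantic_model table_names → Spec_ordered_tables_py semantic_model table_names (ordered_tables_py semantic_model table_names)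

-- ===== LEMMAS AND PROOFS =====

-- The reference key: first-occurrence index in `names` for preferred tables,
-- `names.length + (position in ks)` for the rest.
def pvKey (names ks : List String) (t : String) : Int :=
  if t ∈ names then (List.idxOf t names : Int) else (names.length : Int) + (List.idxOf t ks : Int)

-- A's first loop, after rewriting its step as a guarded Set.add.
def pvPref (names ks : List String) : List String :=
  names.foldl (fun s t => if t ∈ ks then PySem.Set.add s t else s) []

-- closed form of pvPref
theorem pvPref_eq_ofList (names ks : List String) :
    pvPref names ks = PySem.Set.ofList (names.filter (fun t => decide (t ∈ ks))) := by
  unfold pvPref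
  rw [PySem.List.foldl_ite_eq_foldl_filter (p := fun t => t ∈ ks) PySem.Set.add names []]
  rw [PySem.Set.ofList_eq_foldl]

theorem mem_pvPref {names ks : List String} {x : String} :
    x ∈ pvPref names ks ↔ x ∈ names ∧ x ∈ ks := by
  rw [pvPref_eq_ofList]
  simp [PySem.Set.mem_ofList, List.mem_filter]

theorem nodup_pvPref (names ks : List String) : (pvPref names ks).Nodup := by
  rw [pvPref_eq_ofList]
  exact PySem.Set.nodup_ofList _

-- a guarded dedup fold is ordered by first-occurrence index in its source list
theorem pvGuarded_pairwise (p : String → Prop) [DecidablePred p] (full : List String) :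
    ∀ (suf pre acc : List String), full = pre ++ suf →
      (∀ x, x ∈ acc ↔ x ∈ pre ∧ p x) →
      acc.Pairwise (fun a b => List.idxOf a full < List.idxOf b full) →
      (suf.foldl (fun s t => if p t then PySem.Set.add s t else s) acc).Pairwise
        (fun a b => List.idxOf a full < List.idxOf b full) := by
  intro suf
  induction suf with
  | nil =>
    intro pre acc _ _ hp
    simpa using hp
  | cons x suf ih =>
    intro pre acc hfull hmem hp
    rw [List.foldl_cons]
    by_cases hpx : p x
    · by_cases hxa : x ∈ acc
      · have hadd : (if p x then PySem.Set.add acc x else acc) = acc := by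
          simp [hpx, PySem.Set.add, PySem.Set.contains, List.contains_iff_mem, hxa]
        rw [hadd]
        refine ih (pre ++ [x]) acc (by simp [hfull]) ?_ hp
        intro t
        rcases eq_or_ne t x with rfl | hne
        · simp [hxa, hpx]
        · rw [hmem t]
          simp [hne]
      · have hadd : (if p x then PySem.Set.add acc x else acc) = acc ++ [x] := by
          simp [hpx, PySem.Set.add, PySem.Set.contains, List.contains_iff_mem, hxa]
        rw [hadd]
        have hxpre : x ∉ pre := fun hx => hxa ((hmem x).2 ⟨hx, hpx⟩)
        refine ih (pre ++ [x]) (acc ++ [x]) (by simp [hfull]) ?_ ?_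
        · intro t
          rcases eq_or_ne t x with rfl | hne
          · simp [hpx]
          · rw [List.mem_append]
            simp only [List.mem_singleton, hne, or_false]
            rw [hmem t]
            simp [hne]
        · rw [List.pairwise_append]
          refine ⟨hp, by simp, ?_⟩
          intro a ha b hb
          rw [List.mem_singleton] at hb
          subst hb
          have hapre : a ∈ pre := ((hmem a).1 ha).1
          have h1 : List.idxOf a full < pre.length := by
            rw [hfull, List.idxOf_append]
            simp only [hapre, if_pos]
            exact List.idxOf_lt_length_iff.mpr hapre
          have h2 : pre.length ≤ List.idxOf b full := by
            rw [hfull, List.idxOf_append]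
            simp only [hxpre, if_neg, if_false]
            omega
          omega
    · have hadd : (if p x then PySem.Set.add acc x else acc) = acc := by simp [hpx]
      rw [hadd]
      refine ih (pre ++ [x]) acc (by simp [hfull]) ?_ hp
      intro t
      rcases eq_or_ne t x with rfl | hne
      · have : t ∉ acc := fun h => hpx ((hmem t).1 h).2
        simp [this, hpx]
      · rw [hmem t]
        simp [hne]

theorem pvPref_pairwise (names ks : List String) :
    (pvPref names ks).Pairwise (fun a b => List.idxOf a names < List.idxOf b names) := by
  have := pvGuarded_pairwise (fun t => t ∈ ks) names names [] [] rfl (by simp) (by simp)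
  exact this

-- A nodup list is ordered by its own idxOf.
theorem pvNodup_pairwise_idxOf {ks : List String} (h : ks.Nodup) :
    ks.Pairwise (fun a b => List.idxOf a ks < List.idxOf b ks) := by
  rw [List.pairwise_iff_getElem]
  intro i j hi hj hij
  rw [List.Nodup.idxOf_getElem h i hi, List.Nodup.idxOf_getElem h j hj]
  exact hij

-- Set.update on a nodup list appends the missing elements
theorem pvUpdate_eq_append {l : List String} (hl : l.Nodup) :
    ∀ s : List String, PySem.Set.update s l = s ++ l.filter (fun t => decide (t ∉ s)) := by
  induction l with
  | nil => intro s; simp [PySem.Set.update]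
  | cons x l ih =>
    intro s
    have hxl : x ∉ l := (List.nodup_cons.mp hl).1
    have hl' : l.Nodup := (List.nodup_cons.mp hl).2
    have step : PySem.Set.update s (x :: l) = PySem.Set.update (PySem.Set.add s x) l := by
      simp [PySem.Set.update]
    rw [step]
    by_cases hxs : x ∈ s
    · have hadd : PySem.Set.add s x = s := by
        simp [PySem.Set.add, PySem.Set.contains, List.contains_iff_mem, hxs]
      rw [hadd, ih hl' s]
      congr 1
      rw [List.filter_cons]
      simp [hxs]
    · have hadd : PySem.Set.add s x = s ++ [x] := by
        simp [PySem.Set.add, PySem.Set.contains, hxs]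
      rw [hadd, ih hl' (s ++ [x])]
      have hF : List.filter (fun t => decide (t ∉ s ++ [x])) l
          = List.filter (fun t => decide (t ∉ s)) l := by
        refine List.filter_congr ?_
        intro t ht
        have hne : t ≠ x := fun h => hxl (h ▸ ht)
        simp [hne]
      rw [hF]
      simp [List.filter_cons, hxs]

-- the priority dict computes the first-occurrence index
theorem pvPriority_getD (names : List String) :
    ∀ (s : Int) (d : PySem.Dict String Int) (t : String) (dflt : Int),
      ((PySem.List.enumerate names s).foldl
        (fun pr p => if pr.contains p.2 = true then pr else pr.insert p.2 p.1) d).getD t dflt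
      = if d.contains t = true then d.getD t dflt
        else if t ∈ names then s + (List.idxOf t names : Int) else dflt := by
  induction names with
  | nil =>
    intro s d t dflt
    simp only [PySem.List.enumerate, List.foldl_nil, List.not_mem_nil, if_false]
    by_cases hdt : d.contains t = true
    · simp [hdt]
    · simp only [hdt, if_false]
      exact PySem.Dict.getD_of_not_contains d dflt (by simpa using hdt)
  | cons x xs ih =>
    intro s d t dflt
    rw [PySem.List.enumerate_cons, List.foldl_cons]
    by_cases hdx : d.contains x = true
    · rw [if_pos hdx, ih (s + 1) d t dflt]
      rcases eq_or_ne t x with rfl | hne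
      · simp [hdx]
      · by_cases hdt : d.contains t = true
        · simp [hdt]
        · simp only [hdt, if_false]
          rw [List.idxOf_cons]
          have hbeq : (x == t) = false := by simp [hne.symm]
          simp only [hbeq, cond_false]
          by_cases htxs : t ∈ xs
          · simp [htxs, hne]
            push_cast
            omega
          · simp [htxs, hne]
    · rw [if_neg hdx, ih (s + 1) (d.insert x s) t dflt]
      rcases eq_or_ne t x with rfl | hne
      · rw [if_pos (by simp [PySem.Dict.contains_insert])]
        rw [PySem.Dict.getD_insert_self]
        simp only [hdx, if_false]
        rw [List.idxOf_cons]
        simp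
      · have hc : (d.insert x s).contains t = d.contains t := by
          rw [PySem.Dict.contains_insert]
          simp [hne]
        rw [hc]
        by_cases hdt : d.contains t = true
        · rw [if_pos hdt, if_pos hdt]
          exact PySem.Dict.getD_insert_of_ne d s dflt hne
        · simp only [hdt, if_false]
          rw [List.idxOf_cons]
          have hbeq : (x == t) = false := by simp [hne.symm]
          simp only [hbeq, cond_false]
          by_cases htxs : t ∈ xs
          · simp [htxs, hne]
            push_cast
            omega
          · simp [htxs, hne]

-- the rank dict computes pvKey on the keys
theorem pvRank_getD (names ks : List String) (hks : ks.Nodup) {t : String} (ht : t ∈ ks) :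
    (((PySem.List.enumerate ks).foldl
      (fun r p => r.insert p.2
        (((PySem.List.enumerate names).foldl
            (fun pr q => if pr.contains q.2 = true then pr else pr.insert q.2 q.1)
            (PySem.Dict.empty : PySem.Dict String Int)).getD p.2 ((names.length : Int) + p.1)))
      (PySem.Dict.empty : PySem.Dict String Int)).getD t 0)
    = pvKey names ks t := by
  have hj : List.idxOf t ks < ks.length := List.idxOf_lt_length_iff.mpr ht
  set prio := (PySem.List.enumerate names).foldl
      (fun pr q => if pr.contains q.2 = true then pr else pr.insert q.2 q.1)
      (PySem.Dict.empty : PySem.Dict String Int) with hprio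
  set rank := (PySem.List.enumerate ks).foldl
      (fun r p => r.insert p.2 (prio.getD p.2 ((names.length : Int) + p.1)))
      (PySem.Dict.empty : PySem.Dict String Int) with hrank
  have hitems : rank.items = (PySem.List.enumerate ks 0).map
      (fun p => (p.2, prio.getD p.2 ((names.length : Int) + p.1))) := by
    rw [hrank]
    have := PySem.Dict.items_foldl_insert_fresh (PySem.List.enumerate ks 0)
      (fun p => p.2) (fun p => prio.getD p.2 ((names.length : Int) + p.1))
      (PySem.Dict.empty : PySem.Dict String Int)
      (by intro a _; exact PySem.Dict.contains_empty a.2)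
      (by rw [PySem.List.map_snd_enumerate]; exact hks)
    simpa using this
  have hkeysnd : rank.keys.Nodup := by
    rw [hrank]
    exact PySem.Dict.nodup_keys_foldl_insert_key _ _ _ _ (by simp [PySem.Dict.keys_empty])
  have hmem : (t, prio.getD t ((names.length : Int) + (List.idxOf t ks : Int))) ∈ rank.items := by
    rw [hitems]
    refine List.mem_map.mpr ⟨((List.idxOf t ks : Int), t), ?_, rfl⟩
    rw [PySem.List.mem_enumerate_iff]
    exact ⟨List.idxOf t ks, hj, by simp [List.getElem_idxOf hj]⟩
  have hget := PySem.Dict.getD_of_mem_items rank hmem hkeysnd 0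
  rw [hget, hprio, pvPriority_getD names 0 _ t _]
  simp only [PySem.Dict.contains_empty, Bool.false_eq_true, if_false]
  unfold pvKey
  by_cases htn : t ∈ names
  · simp [htn]
  · simp [htn]

-- the main list-level equivalence
theorem pvMain (names ks : List String) (hks : ks.Nodup)
    (key : String → Int) (hkey : ∀ t ∈ ks, key t = pvKey names ks t) :
    PySem.Set.update (pvPref names ks) ks = PySem.List.sorted ks key false := by
  rw [pvUpdate_eq_append hks (pvPref names ks)]
  set pref := pvPref names ks with hpref
  set rest := ks.filter (fun t => decide (t ∉ pref)) with hrest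
  have hprefsub : ∀ x ∈ pref, x ∈ ks := fun x hx => (mem_pvPref.mp hx).2
  have hrestmem : ∀ x ∈ rest, x ∈ ks ∧ x ∉ pref := by
    intro x hx
    have := List.mem_filter.mp hx
    exact ⟨this.1, by simpa using this.2⟩
  have hrestnames : ∀ x ∈ rest, x ∉ names := by
    intro x hx hn
    exact (hrestmem x hx).2 (mem_pvPref.mpr ⟨hn, (hrestmem x hx).1⟩)
  -- permutation
  have hperm : (pref ++ rest).Perm ks := by
    have h1 : pref.Perm (ks.filter (fun t => decide (t ∈ pref))) := by
      refine (List.perm_ext_iff_of_nodup (nodup_pvPref names ks) (List.Nodup.filter _ hks)).mpr ?_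
      intro a
      simp only [List.mem_filter, decide_eq_true_eq]
      constructor
      · intro ha; exact ⟨hprefsub a ha, ha⟩
      · intro ha; exact ha.2
    have h2 : (List.filter (fun t => decide (t ∈ pref)) ks ++
        List.filter (fun t => !decide (t ∈ pref)) ks).Perm ks :=
      List.filter_append_perm _ ks
    have h3 : rest = List.filter (fun t => !decide (t ∈ pref)) ks := by
      rw [hrest]
      refine List.filter_congr ?_
      intro x _
      simp
    exact (List.Perm.append h1 (h3 ▸ List.Perm.refl rest)).trans h2
  -- pairwise
  have hpair : (pref ++ rest).Pairwise (fun a b => key a < key b) := by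
    rw [List.pairwise_append]
    refine ⟨?_, ?_, ?_⟩
    · refine List.Pairwise.imp_of_mem ?_ (pvPref_pairwise names ks)
      intro a b ha hb hlt
      have hna : a ∈ names := (mem_pvPref.mp ha).1
      have hnb : b ∈ names := (mem_pvPref.mp hb).1
      rw [hkey a (hprefsub a ha), hkey b (hprefsub b hb)]
      unfold pvKey
      simp only [hna, hnb, if_pos]
      exact_mod_cast hlt
    · refine List.Pairwise.imp_of_mem ?_
        (List.Pairwise.sublist (List.filter_sublist) (pvNodup_pairwise_idxOf hks))
      intro a b ha hb hlt
      rw [hkey a (hrestmem a ha).1, hkey b (hrestmem b hb).1]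
      unfold pvKey
      simp only [hrestnames a ha, hrestnames b hb, if_neg, if_false]
      omega
    · intro a ha b hb
      have hna : a ∈ names := (mem_pvPref.mp ha).1
      rw [hkey a (hprefsub a ha), hkey b (hrestmem b hb).1]
      unfold pvKey
      simp only [hna, if_pos, hrestnames b hb, if_neg, if_false]
      have h1 : List.idxOf a names < names.length := List.idxOf_lt_length_iff.mpr hna
      have h2 : (0:Int) ≤ (List.idxOf b ks : Int) := by positivity
      push_cast
      omega
  exact (PySem.List.sorted_eq_of_perm_of_pairwise_lt ks (pref ++ rest) key hperm hpair).symm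

-- ===== VERDICT (by name: the statement is the Claim_ definition above) =====
theorem ordered_tables_py_spec : Claim_equal_ordered_tables_py := by
  intro sm tn _
  unfold Spec_ordered_tables_py
  simp only [ordered_tables_py, ordered_tables_py_alt]
  set names := tn.getD [] with hn
  set d := PySem.Dict.ofList sm with hd
  have hks : d.keys.Nodup := PySem.Dict.nodup_keys_ofList sm
  have h1 : names.foldl
      (fun acc t => if d.contains t = true ∧ t ∉ acc then acc ++ [t] else acc) []
      = pvPref names d.keys := by
    unfold pvPref
    refine PySem.List.foldl_congr_mem names _ _ [] ?_
    intro acc t _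
    by_cases ht : t ∈ d.keys
    · have hc : d.contains t = true := (PySem.Dict.contains_iff_mem_keys d t).mpr ht
      by_cases hta : t ∈ acc
      · simp [hc, ht, hta, PySem.Set.add, PySem.Set.contains]
      · simp [hc, ht, hta, PySem.Set.add, PySem.Set.contains]
    · have hc : ¬ d.contains t = true := by
        simpa [PySem.Dict.contains_iff_mem_keys] using ht
      simp [hc, ht]
  have h2 : ∀ init : List String,
      d.keys.foldl (fun acc t => if t ∉ acc then acc ++ [t] else acc) init
      = PySem.Set.update init d.keys := by
    intro init
    unfold PySem.Set.update
    refine PySem.List.foldl_congr_mem _ _ _ _ ?_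
    intro acc x _
    by_cases hx : x ∈ acc <;> simp [hx, PySem.Set.add, PySem.Set.contains]
  rw [h1, h2]
  exact pvMain names d.keys hks _ (fun t ht => pvRank_getD names d.keys hks ht)
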